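-- pv_equiv track=rewrite | github.com/Nishant-nehra/PythonCoding | sort/sortUniqueWay.py | sortCheck
-- ===== SOURCE A (Python) =====
-- def sortCheck(arr, start, end):
--
--     if(start + 1 == end):
--         return 1
--
--     mid = (start + end) // 2
--     h1 = sortCheck(arr, start, mid)
--     h2 = sortCheck(arr, mid, end)
--
--     if(h1 == h2 and h1 == (end - start) // 2 and arr[mid - 1] <= arr[mid]):
--         return end-start
--
--     return max(h1, h2)
-- ===== SOURCE B (Python) =====
-- def sortCheck(arr, start, end):
--     # Iterative post-order traversal with an explicit stack of segments.
--     stack = [(start, end, False)]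
--     results = {}
--     while stack:
--         s, e, ready = stack.pop()
--         if s + 1 == e:
--             results[(s, e)] = 1
--         elif ready:
--             m = (s + e) // 2
--             h1 = results[(s, m)]
--             h2 = results[(m, e)]
--             if h1 == h2 and h1 == (e - s) // 2 and arr[m - 1] <= arr[m]:
--                 results[(s, e)] = e - s
--             else:
--                 results[(s, e)] = max(h1, h2)
--         else:
--             m = (s + e) // 2
--             stack.append((s, e, True))
--             stack.append((m, e, False))
--             stack.append((s, m, False))
--     return results[(start, end)]
-- ===== Notes on version B (the rewrite author's own statement) =====
-- stated objective: alternative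
-- what changed: Replaces the naive top-down recursion by an iterative post-order traversal with an explicit stack of (start,end,ready) frames and a results table keyed by segment.
-- outside the precondition, e.g. on sortCheck([1, 2], -3, 0): A returns 2, B returns 2
import Mathlib
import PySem

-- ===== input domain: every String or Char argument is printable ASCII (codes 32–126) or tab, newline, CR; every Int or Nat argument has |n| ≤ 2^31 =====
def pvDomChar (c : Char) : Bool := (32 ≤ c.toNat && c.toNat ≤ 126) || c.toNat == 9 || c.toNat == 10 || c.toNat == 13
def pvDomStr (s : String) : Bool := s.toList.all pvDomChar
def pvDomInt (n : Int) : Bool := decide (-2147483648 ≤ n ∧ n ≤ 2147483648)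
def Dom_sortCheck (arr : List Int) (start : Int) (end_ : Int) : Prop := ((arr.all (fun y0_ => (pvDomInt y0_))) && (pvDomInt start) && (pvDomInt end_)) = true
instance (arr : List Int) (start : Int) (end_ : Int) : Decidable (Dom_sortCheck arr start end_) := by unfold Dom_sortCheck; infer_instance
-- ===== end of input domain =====

-- B rewrites A's top-down recursion as an iterative post-order traversal with an
-- explicit stack of (start,end,ready) frames and a results table; same cost, no recursion.
-- Equivalence is about the return value; neither program mutates its arguments.

-- ===== PORT A =====
-- A's recursion diverges when end_ ≤ start (excluded by Pre_); the fuel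
-- (end_ - start).toNat only makes the same recursion total: it strictly exceeds
-- the recursion depth on every input with start < end_.
def sortCheckF (arr : List Int) : Nat → Int → Int → Int
  | 0, _, _ => 0
  | f + 1, start, end_ =>
    if start + 1 = end_ then 1
    else
      let mid := PySem.Int.floordiv (start + end_) 2
      let h1 := sortCheckF arr f start mid
      let h2 := sortCheckF arr f mid end_
      if h1 = h2 ∧ h1 = PySem.Int.floordiv (end_ - start) 2 ∧
          PySem.List.pyGetD arr (mid - 1) 0 ≤ PySem.List.pyGetD arr mid 0
      then end_ - start
      else max h1 h2

def sortCheck (arr : List Int) (start : Int) (end_ : Int) : Int :=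
  sortCheckF arr (end_ - start).toNat start end_

-- ===== PORT B =====
-- the while loop of Source B; stack head = Python's stack top; fuel 3·(end_-start).toNat
-- bounds the number of loop iterations (exactly 3·len − 2 are used) and only makes it total.
def loopB (arr : List Int) : Nat → List (Int × Int × Bool) → PySem.Dict (Int × Int) Int → PySem.Dict (Int × Int) Int
  | 0, _, results => results
  | _ + 1, [], results => results
  | f + 1, (s, e, ready) :: stack, results =>
    if s + 1 = e then loopB arr f stack (results.insert (s, e) 1)
    else if ready then
      let m := PySem.Int.floordiv (s + e) 2
      let h1 := results.getD (s, m) 0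
      let h2 := results.getD (m, e) 0
      let v := if h1 = h2 ∧ h1 = PySem.Int.floordiv (e - s) 2 ∧
                  PySem.List.pyGetD arr (m - 1) 0 ≤ PySem.List.pyGetD arr m 0
               then e - s else max h1 h2
      loopB arr f stack (results.insert (s, e) v)
    else
      let m := PySem.Int.floordiv (s + e) 2
      loopB arr f ((s, m, false) :: (m, e, false) :: (s, e, true) :: stack) results

def sortCheck_alt (arr : List Int) (start : Int) (end_ : Int) : Int :=
  (loopB arr (3 * (end_ - start).toNat) [(start, end_, false)] PySem.Dict.empty).getD (start, end_) 0

-- ===== PRECONDITION & SPEC =====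
-- Pre_: a nonempty segment whose positions all lie in Python's index range [-len, len)
-- (one-element segments never touch arr and are always fine). Excluded are end_ ≤ start,
-- where A recurses forever, and segments reaching outside that range, where whether A raises
-- IndexError or returns via negative wraparound depends on the data (a corner nobody
-- specifies; B behaves identically there when A returns).
def Pre_sortCheck (arr : List Int) (start : Int) (end_ : Int) : Prop :=
  start + 1 = end_ ∨ (start < end_ ∧ -(arr.length : Int) ≤ start ∧ end_ ≤ (arr.length : Int))
instance (arr : List Int) (start : Int) (end_ : Int) : Decidable (Pre_sortCheck arr start end_) := by unfold Pre_sortCheck; infer_instance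

def pvWitness_sortCheck : List Int × Int × Int := ([3, 1, 2, 4], 0, 4)

def Spec_sortCheck (arr : List Int) (start : Int) (end_ : Int) (out : Int) : Prop := out = sortCheck_alt arr start end_
instance (arr : List Int) (start : Int) (end_ : Int) (out : Int) : Decidable (Spec_sortCheck arr start end_ out) := by unfold Spec_sortCheck; infer_instance

-- ===== CLAIM (what is proved, stated in full; the proofs are below) =====
def Claim_equal_sortCheck : Prop := ∀ (arr : List Int) (start : Int) (end_ : Int), Dom_sortCheck arr start end_ → Pre_sortCheck arr start end_ → Spec_sortCheck arr start end_ (sortCheck arr start end_)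

-- ===== LEMMAS AND PROOFS =====

-- midpoint bounds: for a segment of length ≥ 2 the midpoint is strictly inside
theorem pvMidBounds (s e : Int) (h2 : s + 2 ≤ e) :
    s < PySem.Int.floordiv (s + e) 2 ∧ PySem.Int.floordiv (s + e) 2 < e := by
  rw [PySem.Int.floordiv_eq_ediv_of_pos (a := s + e) (by omega)]
  omega

-- fuel irrelevance for the port of A: any fuel ≥ segment length gives the same value
theorem sortCheckF_congr (arr : List Int) :
    ∀ n f g s e, s < e → (e - s).toNat = n → n ≤ f → n ≤ g →
      sortCheckF arr f s e = sortCheckF arr g s e := by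
  intro n
  induction n using Nat.strong_induction_on with
  | _ n ih =>
    intro f g s e hse hn hf hg
    have hn1 : 1 ≤ n := by omega
    obtain ⟨f', rfl⟩ : ∃ f', f = f' + 1 := ⟨f - 1, by omega⟩
    obtain ⟨g', rfl⟩ : ∃ g', g = g' + 1 := ⟨g - 1, by omega⟩
    by_cases hb : s + 1 = e
    · simp [sortCheckF, hb]
    · have h2 : s + 2 ≤ e := by omega
      obtain ⟨hm1, hm2⟩ := pvMidBounds s e h2
      set m := PySem.Int.floordiv (s + e) 2 with hm
      have ha : ((m - s).toNat) < n := by omega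
      have hbn : ((e - m).toNat) < n := by omega
      have e1 : sortCheckF arr f' s m = sortCheckF arr g' s m :=
        ih _ ha f' g' s m hm1 rfl (by omega) (by omega)
      have e2 : sortCheckF arr f' m e = sortCheckF arr g' m e :=
        ih _ hbn f' g' m e hm2 rfl (by omega) (by omega)
      simp only [sortCheckF, hb, if_false, ← hm, e1, e2]

-- ghost recursion describing exactly which (segment ↦ value) pairs B's loop inserts
def insTree (arr : List Int) (s e : Int) (r : PySem.Dict (Int × Int) Int) : PySem.Dict (Int × Int) Int :=
  if s + 1 = e then r.insert (s, e) 1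
  else if h : s + 2 ≤ e then
    have hm := pvMidBounds s e h
    (insTree arr (PySem.Int.floordiv (s + e) 2) e
        (insTree arr s (PySem.Int.floordiv (s + e) 2) r)).insert (s, e)
      (sortCheckF arr (e - s).toNat s e)
  else r
termination_by (e - s).toNat
decreasing_by
  · omega
  · omega

-- insTree only touches keys (u, v) with s ≤ u and v ≤ e
theorem insTree_getD_of_outside (arr : List Int) :
    ∀ n s e r k d, (e - s).toNat = n → ¬ (s ≤ k.1 ∧ k.2 ≤ e) →
      (insTree arr s e r).getD k d = r.getD k d := by
  intro n
  induction n using Nat.strong_induction_on with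
  | _ n ih =>
    intro s e r k d hn hk
    by_cases hb : s + 1 = e
    · rw [insTree, if_pos hb, PySem.Dict.getD_insert]
      have : ¬ k = (s, e) := by rintro rfl; exact hk ⟨le_refl _, le_refl _⟩
      simp [this]
    · by_cases h2 : s + 2 ≤ e
      · obtain ⟨hm1, hm2⟩ := pvMidBounds s e h2
        set m := PySem.Int.floordiv (s + e) 2 with hmdef
        rw [insTree, if_neg hb, dif_pos h2]
        rw [PySem.Dict.getD_insert]
        have hne : ¬ k = (s, e) := by rintro rfl; exact hk ⟨le_refl _, le_refl _⟩
        simp only [hne, if_false]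
        rw [ih ((e - m).toNat) (by omega) m e _ k d rfl (by rintro ⟨h1, h2'⟩; exact hk ⟨by omega, h2'⟩)]
        exact ih ((m - s).toNat) (by omega) s m r k d rfl (by rintro ⟨h1, h2'⟩; exact hk ⟨h1, by omega⟩)
      · rw [insTree, if_neg hb, dif_neg h2]

-- the top key of insTree holds A's value for the segment
theorem insTree_getD_self (arr : List Int) (s e : Int) (r : PySem.Dict (Int × Int) Int)
    (d : Int) (hse : s < e) :
    (insTree arr s e r).getD (s, e) d = sortCheckF arr (e - s).toNat s e := by
  by_cases hb : s + 1 = e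
  · rw [insTree, if_pos hb, PySem.Dict.getD_insert]
    have : (e - s).toNat = 1 := by omega
    simp [this, sortCheckF, hb]
  · have h2 : s + 2 ≤ e := by omega
    rw [insTree, if_neg hb, dif_pos h2, PySem.Dict.getD_insert]
    simp

-- main simulation: processing one unready frame runs A's recursion for that segment,
-- consumes exactly 3·len − 2 fuel and records insTree's insertions
theorem loopB_frame (arr : List Int) :
    ∀ n s e stack r fuel, s < e → (e - s).toNat = n → 3 * n - 2 ≤ fuel →
      loopB arr fuel ((s, e, false) :: stack) r
        = loopB arr (fuel - (3 * n - 2)) stack (insTree arr s e r) := by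
  intro n
  induction n using Nat.strong_induction_on with
  | _ n ih =>
    intro s e stack r fuel hse hn hfuel
    have hn1 : 1 ≤ n := by omega
    obtain ⟨f, rfl⟩ : ∃ f, fuel = f + 1 := ⟨fuel - 1, by omega⟩
    by_cases hb : s + 1 = e
    · have hone : n = 1 := by omega
      rw [loopB, if_pos hb, insTree, if_pos hb]
      congr 1
      omega
    · have h2 : s + 2 ≤ e := by omega
      obtain ⟨hm1, hm2⟩ := pvMidBounds s e h2
      set m := PySem.Int.floordiv (s + e) 2 with hmdef
      set a := (m - s).toNat with hadef
      set b := (e - m).toNat with hbdef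
      have hab : a + b = n := by omega
      have ha1 : 1 ≤ a := by omega
      have hb1 : 1 ≤ b := by omega
      rw [loopB, if_neg hb]
      simp only [Bool.false_eq_true, if_false, ← hmdef]
      rw [ih a (by omega) s m _ r f hm1 rfl (by omega)]
      rw [ih b (by omega) m e _ _ _ hm2 rfl (by omega)]
      set r1 := insTree arr s m r with hr1
      set r2 := insTree arr m e r1 with hr2
      have hab' : a + b = n := hab
      obtain ⟨g, hgdef⟩ : ∃ g, f - (3 * a - 2) - (3 * b - 2) = g + 1 :=
        ⟨f - (3 * a - 2) - (3 * b - 2) - 1, by omega⟩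
      rw [hgdef, loopB, if_neg hb]
      simp only [if_true, ← hmdef]
      have hv1 : r2.getD (s, m) 0 = sortCheckF arr a s m := by
        rw [hr2, insTree_getD_of_outside arr b m e r1 (s, m) 0 rfl (by simp; omega), hr1,
          insTree_getD_self arr s m r 0 hm1]
      have hv2 : r2.getD (m, e) 0 = sortCheckF arr b m e := by
        rw [hr2, insTree_getD_self arr m e r1 0 hm2]
      rw [hv1, hv2]
      have hA : sortCheckF arr n s e
          = if sortCheckF arr a s m = sortCheckF arr b m e ∧
                sortCheckF arr a s m = PySem.Int.floordiv (e - s) 2 ∧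
                PySem.List.pyGetD arr (m - 1) 0 ≤ PySem.List.pyGetD arr m 0
            then e - s else max (sortCheckF arr a s m) (sortCheckF arr b m e) := by
        obtain ⟨n', rfl⟩ : ∃ n', n = n' + 1 := ⟨n - 1, by omega⟩
        rw [sortCheckF]
        simp only [hb, if_false, ← hmdef]
        rw [sortCheckF_congr arr a n' a s m hm1 rfl (by omega) (le_refl _),
          sortCheckF_congr arr b n' b m e hm2 rfl (by omega) (le_refl _)]
      rw [insTree, if_neg hb, dif_pos h2]
      simp only [← hmdef, ← hr1, ← hr2, hn, ← hA]
      congr 1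
      omega

-- ===== VERDICT (by name: the statement is the Claim_ definition above) =====
theorem sortCheck_spec : Claim_equal_sortCheck := by
  intro arr start end_ _ hpre
  have hse : start < end_ := by
    rcases hpre with h | ⟨h, _, _⟩ <;> omega
  unfold Spec_sortCheck sortCheck sortCheck_alt
  rw [loopB_frame arr ((end_ - start).toNat) start end_ [] PySem.Dict.empty
      (3 * (end_ - start).toNat) hse rfl (by omega)]
  have hn1 : 1 ≤ (end_ - start).toNat := by omega
  obtain ⟨g, hg⟩ : ∃ g, 3 * (end_ - start).toNat - (3 * (end_ - start).toNat - 2) = g + 1 :=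
    ⟨1, by omega⟩
  rw [hg, loopB, insTree_getD_self arr start end_ PySem.Dict.empty 0 hse]
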